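-- pv_equiv track=rewrite | github.com/AdvancedPhotonSource/cohere-ui | cohere-scripts/util/util.py | get_gpu_distribution
-- ===== SOURCE A (Python) =====
-- def get_gpu_distribution(runs, available):
--     """
--     Finds how to distribute the available runs to perform the given number of runs.
--
--     Parameters
--     ----------
--     runs : int
--         number of reconstruction requested
--
--     available : list
--         list of available runs aligned with the GPU id list
--
--     Returns
--     -------
--     list
--         list of runs aligned with the GPU id list, the runs are equally distributed across the GPUs
--     """
--     from functools import reduce
--
--     all_avail = reduce((lambda x, y: x + y), available)
--     distributed = [0] * len(available)
--     sum_distr = 0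
--     while runs > sum_distr and all_avail > 0:
--         # balance distribution
--         for i in range(len(available)):
--             if available[i] > 0:
--                 available[i] -= 1
--                 all_avail -= 1
--                 distributed[i] += 1
--                 sum_distr += 1
--                 if sum_distr == runs:
--                     break
--     return distributed
-- ===== SOURCE B (Python) =====
-- def get_gpu_distribution(runs, available):
--     # Water-filling: find the fill level K by binary search on the monotone
--     # cumulative function f(k) = sum(min(x,k) over positive x), then emit the
--     # result in one pass, instead of simulating round-robin rounds.
--     n = len(available)
--     S = sum(available)
--     if runs <= 0 or S <= 0:
--         return [0] * n
--     pos = [x if x > 0 else 0 for x in available]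
--     def f(k):
--         return sum(x if x < k else k for x in pos)
--     G = runs if runs < S else S
--     lo, hi = 0, max(pos)
--     while lo < hi:
--         mid = (lo + hi) // 2
--         if f(mid) >= G:
--             hi = mid
--         else:
--             lo = mid + 1
--     K = lo - 1
--     fK = f(K)
--     flo = f(lo)
--     T = runs if runs < flo else flo
--     m = T - fK
--     out = []
--     for x in available:
--         base = min(max(x, 0), K)
--         if x > K and m > 0:
--             base += 1
--             m -= 1
--         out.append(base)
--     return out
-- ===== Notes on version B (the rewrite author's own statement) =====
-- stated objective: alternative
-- what changed: A simulates the distribution round by round, mutating the availability list (one pass over all GPUs per round); B computes the water-filling level K directly by binary search on the monotone cumulative function f(k)=sum(min(x,k)) and emits the result in a single pass.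
import Mathlib
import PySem

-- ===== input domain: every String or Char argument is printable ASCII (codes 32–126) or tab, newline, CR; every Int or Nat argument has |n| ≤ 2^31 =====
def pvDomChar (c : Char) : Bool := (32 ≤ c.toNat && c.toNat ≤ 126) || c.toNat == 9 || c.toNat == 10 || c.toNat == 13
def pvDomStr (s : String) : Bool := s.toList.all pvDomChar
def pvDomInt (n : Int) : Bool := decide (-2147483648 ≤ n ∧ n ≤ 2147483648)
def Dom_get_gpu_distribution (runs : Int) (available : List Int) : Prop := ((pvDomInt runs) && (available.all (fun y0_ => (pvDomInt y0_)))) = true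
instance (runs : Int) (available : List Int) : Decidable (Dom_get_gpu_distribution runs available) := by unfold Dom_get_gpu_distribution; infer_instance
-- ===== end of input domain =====

-- B replaces A's round-by-round simulation by a water-filling level found by binary
-- search plus one emission pass (alternative algorithm; A also mutates `available`
-- in place, B does not — the equivalence proved here is about the return value).

-- ===== PORT A =====
-- inner `for i in range(len(available))` loop with its `break`: walks the
-- (available[i], distributed[i]) pairs, returns updated pairs, sum_distr, all_avail
def pvInnerA (runs : Int) : List (Int × Int) → Int → Int → (List (Int × Int) × Int × Int)
  | [], sumd, allav => ([], sumd, allav)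
  | (a, d) :: rest, sumd, allav =>
    if a > 0 then
      if sumd + 1 = runs then ((a - 1, d + 1) :: rest, sumd + 1, allav - 1)
      else
        let r := pvInnerA runs rest (sumd + 1) (allav - 1)
        ((a - 1, d + 1) :: r.1, r.2)
    else
      let r := pvInnerA runs rest sumd allav
      ((a, d) :: r.1, r.2)

-- outer `while` loop; fuel is a pure termination guard: each executed round has
-- all_avail > 0 and decreases it by at least 1, so `all_avail.toNat + 1` rounds suffice
def pvOuterA (runs : Int) : Nat → List (Int × Int) → Int → Int → List Int
  | 0, st, _, _ => st.map Prod.snd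
  | fuel + 1, st, sumd, allav =>
    if runs > sumd ∧ allav > 0 then
      let r := pvInnerA runs st sumd allav
      pvOuterA runs fuel r.1 r.2.1 r.2.2
    else st.map Prod.snd

def get_gpu_distribution (runs : Int) (available : List Int) : List Int :=
  match available with
  | [] => []   -- Python: reduce over an empty list raises TypeError; excluded by Pre_
  | h :: t =>
    let allav := t.foldl (· + ·) h   -- reduce((lambda x, y: x + y), available)
    pvOuterA runs (allav.toNat + 1) (available.map (fun x => (x, 0))) 0 allav

-- ===== PORT B =====
-- f(k) = sum(x if x < k else k for x in pos)
def pvF (pos : List Int) (k : Int) : Int :=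
  pos.foldl (fun s x => s + (if x < k then x else k)) 0

-- the `while lo < hi` binary search; fuel is a termination guard (hi - lo shrinks)
def pvSearchB (pos : List Int) (G : Int) : Nat → Int → Int → Int
  | 0, lo, _ => lo
  | fuel + 1, lo, hi =>
    if lo < hi then
      let mid := PySem.Int.floordiv (lo + hi) 2   -- (lo + hi) // 2
      if pvF pos mid ≥ G then pvSearchB pos G fuel lo mid
      else pvSearchB pos G fuel (mid + 1) hi
    else lo

-- the final emission loop over `available`
def pvEmit (K : Int) : List Int → Int → List Int
  | [], _ => []
  | x :: rest, m =>
    if x > K ∧ m > 0 then (min (max x 0) K + 1) :: pvEmit K rest (m - 1)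
    else (min (max x 0) K) :: pvEmit K rest m

def get_gpu_distribution_alt (runs : Int) (available : List Int) : List Int :=
  let n := available.length
  let S := available.foldl (· + ·) 0   -- sum(available)
  if runs ≤ 0 ∨ S ≤ 0 then List.replicate n 0
  else
    let pos := available.map (fun x => if x > 0 then x else 0)
    let G := if runs < S then runs else S
    let M := match pos with
             | [] => 0          -- unreachable here: S > 0 forces available ≠ []
             | h :: t => t.foldl max h   -- max(pos)
    let lo := pvSearchB pos G (M.toNat + 1) 0 M
    let K := lo - 1
    let fK := pvF pos K
    let flo := pvF pos lo
    let T := if runs < flo then runs else flo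
    pvEmit K available (T - fK)

-- ===== PRECONDITION & SPEC =====
-- Pre_ excludes only the empty list, on which A raises TypeError (reduce of an empty sequence).
def Pre_get_gpu_distribution (runs : Int) (available : List Int) : Prop := available ≠ []
instance (runs : Int) (available : List Int) : Decidable (Pre_get_gpu_distribution runs available) := by unfold Pre_get_gpu_distribution; infer_instance
def pvWitness_get_gpu_distribution : Int × List Int := (3, [2, 2])

def Spec_get_gpu_distribution (runs : Int) (available : List Int) (out : List Int) : Prop := out = get_gpu_distribution_alt runs available
instance (runs : Int) (available : List Int) (out : List Int) : Decidable (Spec_get_gpu_distribution runs available out) := by unfold Spec_get_gpu_distribution; infer_instance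

-- ===== CLAIM (what is proved, stated in full; the proofs are below) =====
def Claim_equal_get_gpu_distribution : Prop := ∀ (runs : Int) (available : List Int), Dom_get_gpu_distribution runs available → Pre_get_gpu_distribution runs available → Spec_get_gpu_distribution runs available (get_gpu_distribution runs available)

-- ===== LEMMAS AND PROOFS =====

-- per-GPU amount given after "level" K of round-robin: min(x⁺, K)
def pvG (x K : Int) : Int := min (max x 0) K

-- cumulative amount after K full rounds
def pvFA (a : List Int) (K : Int) : Int := (a.map (fun x => pvG x K)).sum

-- number of GPUs still positive at level K
def pvCnt (a : List Int) (K : Int) : Int := ((a.filter (fun x => K < x)).length : Int)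

-- joint (available[i], distributed[i]) state: level K, plus m extra units handed
-- to the first m entries still positive at level K (m = 0: exactly level K)
def pvSt (K : Int) : List Int → Int → List (Int × Int)
  | [], _ => []
  | x :: rest, m =>
    if x > K ∧ m > 0 then (x - (pvG x K + 1), pvG x K + 1) :: pvSt K rest (m - 1)
    else (x - pvG x K, pvG x K) :: pvSt K rest m

lemma pvCnt_nonneg (a : List Int) (K : Int) : 0 ≤ pvCnt a K := by
  simp [pvCnt]

lemma pvCnt_cons (x : Int) (a : List Int) (K : Int) :
    pvCnt (x :: a) K = pvCnt a K + if K < x then 1 else 0 := by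
  by_cases h : K < x <;> simp [pvCnt, h]

lemma pvFA_succ (a : List Int) (K : Int) (hK : 0 ≤ K) :
    pvFA a (K + 1) = pvFA a K + pvCnt a K := by
  induction a with
  | nil => simp [pvFA, pvCnt]
  | cons x rest ih =>
    have hg : pvG x (K + 1) = pvG x K + if K < x then 1 else 0 := by
      simp only [pvG]; split_ifs <;> omega
    by_cases hx : K < x
    · simp only [pvFA, List.map_cons, List.sum_cons, pvCnt_cons, hg, if_pos hx] at *
      omega
    · simp only [pvFA, List.map_cons, List.sum_cons, pvCnt_cons, hg, if_neg hx] at *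
      omega

lemma pvEmit_eq_map_snd (K : Int) (a : List Int) (m : Int) :
    pvEmit K a m = (pvSt K a m).map Prod.snd := by
  induction a generalizing m with
  | nil => simp [pvEmit, pvSt]
  | cons x rest ih =>
    by_cases h : x > K ∧ m > 0 <;> simp [pvEmit, pvSt, h, ih, pvG]

lemma pvSt_full (K : Int) (a : List Int) (m : Int) (hK : 0 ≤ K)
    (hm : pvCnt a K ≤ m) : pvSt K a m = pvSt (K + 1) a 0 := by
  induction a generalizing m with
  | nil => simp [pvSt]
  | cons x rest ih =>
    rw [pvCnt_cons] at hm
    have hc := pvCnt_nonneg rest K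
    by_cases hx : K < x
    · rw [if_pos hx] at hm
      have e1 : pvG x (K + 1) = pvG x K + 1 := by simp only [pvG]; omega
      simp only [pvSt, if_pos (show x > K ∧ m > 0 by omega),
        if_neg (show ¬ (x > K + 1 ∧ (0 : Int) > 0) by omega), e1]
      rw [ih (m - 1) (by omega)]
    · rw [if_neg hx] at hm
      have e1 : pvG x (K + 1) = pvG x K := by simp only [pvG]; omega
      simp only [pvSt, if_neg (show ¬ (x > K ∧ m > 0) by omega),
        if_neg (show ¬ (x > K + 1 ∧ (0 : Int) > 0) by omega), e1]
      rw [ih m (by omega)]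

-- ROUND LEMMA: one pass of the inner for-loop from the exact-level-K state
lemma pvInnerA_round (r K : Int) (hK : 0 ≤ K) (a : List Int) :
    ∀ (sumd allav : Int), sumd < r →
    pvInnerA r (pvSt K a 0) sumd allav =
      (pvSt K a (r - sumd),
       sumd + min (pvCnt a K) (r - sumd),
       allav - min (pvCnt a K) (r - sumd)) := by
  induction a with
  | nil =>
    intro sumd allav h
    have hm : min (pvCnt ([] : List Int) K) (r - sumd) = 0 := by
      simp [pvCnt]; omega
    simp [pvSt, pvInnerA, hm]
  | cons x rest ih =>
    intro sumd allav h
    have hc := pvCnt_nonneg rest K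
    have hnos : ¬ (x > K ∧ (0 : Int) > 0) := by omega
    by_cases hx : K < x
    · -- available[i] > 0 here: x - pvG x K = x - K > 0
      have hpos : x - pvG x K > 0 := by simp only [pvG]; omega
      have hm1 : x > K ∧ r - sumd > 0 := ⟨hx, by omega⟩
      by_cases hbr : sumd + 1 = r
      · -- break: sum_distr == runs
        have hmin : min (pvCnt (x :: rest) K) (r - sumd) = 1 := by
          rw [pvCnt_cons]; simp [hx]; omega
        have h0 : r - sumd - 1 = 0 := by omega
        simp only [pvSt, if_neg hnos, pvInnerA, if_pos hpos, if_pos hbr, hmin,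
          if_pos hm1, h0, Prod.mk.injEq, List.cons.injEq]
        all_goals and_intros <;> first
        | omega
        | (simp only [pvG]; try omega)
      · -- serve, no break: continue over the rest of the row
        have hrec := ih (sumd + 1) (allav - 1) (by omega)
        have hmin : min (pvCnt (x :: rest) K) (r - sumd)
            = min (pvCnt rest K) (r - (sumd + 1)) + 1 := by
          rw [pvCnt_cons]; simp [hx]; omega
        have h1 : r - sumd - 1 = r - (sumd + 1) := by omega
        simp only [pvSt, if_neg hnos, pvInnerA, if_pos hpos, if_neg hbr, hrec,
          if_pos hm1, hmin, h1, Prod.mk.injEq, List.cons.injEq]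
        all_goals and_intros <;> first
        | omega
        | (simp only [pvG]; try omega)
    · -- available[i] ≤ 0 at this level: skip
      have hpos : ¬ (x - pvG x K > 0) := by simp only [pvG]; omega
      have hm1 : ¬ (x > K ∧ r - sumd > 0) := by omega
      have hrec := ih sumd allav h
      have hmin : pvCnt (x :: rest) K = pvCnt rest K := by
        rw [pvCnt_cons]; simp [hx]
      simp only [pvSt, if_neg hnos, pvInnerA, if_neg hpos, hrec, if_neg hm1, hmin]

-- OUTER LEMMA: the whole while-loop, given the first level k0 at which it stops
lemma pvOuterA_levels (r Sv : Int) (a : List Int) :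
    ∀ (fuel : Nat) (K k0 : Int), 0 ≤ K → K ≤ k0 →
    (∀ j, K ≤ j → j < k0 → pvFA a j < r ∧ pvFA a j < Sv) →
    (r ≤ pvFA a k0 ∨ Sv ≤ pvFA a k0) →
    (k0 - K).toNat < fuel →
    pvOuterA r fuel (pvSt K a 0) (pvFA a K) (Sv - pvFA a K) =
      (if K < k0 then pvEmit (k0 - 1) a (min r (pvFA a k0) - pvFA a (k0 - 1))
       else pvEmit K a 0) := by
  intro fuel
  induction fuel with
  | zero => intro K k0 _ _ _ _ hf; omega
  | succ n ihn =>
    intro K k0 hK hKk0 hbelow hstop hf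
    by_cases hlt : K < k0
    · -- the round at level K runs
      have hKr : pvFA a K < r ∧ pvFA a K < Sv := hbelow K le_rfl hlt
      have hguard : r > pvFA a K ∧ Sv - pvFA a K > 0 := by omega
      rw [pvOuterA, if_pos hguard, pvInnerA_round r K hK a _ _ hKr.1]
      set c := pvCnt a K with hc
      have hc0 := pvCnt_nonneg a K
      have hFs := pvFA_succ a K hK
      by_cases hfull : c < r - pvFA a K
      · -- full round: advance to level K+1
        have hmin : min c (r - pvFA a K) = c := by omega
        have hst : pvSt K a (r - pvFA a K) = pvSt (K + 1) a 0 :=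
          pvSt_full K a _ hK (by omega)
        have hrec := ihn (K + 1) k0 (by omega) (by omega)
          (fun j hj hj2 => hbelow j (by omega) hj2) hstop (by omega)
        simp only [hmin, hst]
        have e1 : pvFA a K + c = pvFA a (K + 1) := by omega
        have e2 : Sv - pvFA a K - c = Sv - pvFA a (K + 1) := by omega
        rw [e1, e2, hrec]
        by_cases hK1lt : K + 1 < k0
        · rw [if_pos hK1lt, if_pos hlt]
        · -- K+1 = k0: the loop exits at the start of round k0
          have hk0 : k0 = K + 1 := by omega
          rw [if_neg hK1lt, if_pos hlt, hk0]
          have hmr : min r (pvFA a (K + 1)) = pvFA a (K + 1) := by omega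
          have h1 : K + 1 - 1 = K := by omega
          rw [hmr, h1]
          have h2 : pvFA a (K + 1) - pvFA a K = c := by omega
          rw [h2, pvEmit_eq_map_snd, pvEmit_eq_map_snd,
            pvSt_full K a c hK le_rfl]
      · -- partial round: sum_distr reaches runs, loop exits
        have hmin : min c (r - pvFA a K) = r - pvFA a K := by omega
        obtain ⟨n', rfl⟩ : ∃ n', n = n' + 1 := ⟨n - 1, by omega⟩
        simp only [hmin]
        have e1 : pvFA a K + (r - pvFA a K) = r := by omega
        rw [e1, pvOuterA, if_neg (by omega)]
        -- here k0 = K + 1: f(K+1) = f(K) + c ≥ r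
        have hk0 : k0 = K + 1 := by
          by_contra hne
          have h2 : K + 1 < k0 := by omega
          have := (hbelow (K + 1) (by omega) h2).1
          omega
        rw [if_pos hlt, hk0]
        have h1 : K + 1 - 1 = K := by omega
        rw [h1]
        have hmr : min r (pvFA a (K + 1)) = r := by omega
        rw [hmr, pvEmit_eq_map_snd]
    · -- K = k0: the while-condition is already false
      have hk : K = k0 := by omega
      have hng : ¬ (r > pvFA a K ∧ Sv - pvFA a K > 0) := by
        rcases hstop with h1 | h1 <;> rw [hk] <;> omega
      rw [pvOuterA, if_neg hng, if_neg hlt, pvEmit_eq_map_snd]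

-- helpers tying the ports' arithmetic to pvFA etc.
lemma foldl_add_eq_sum (l : List Int) : ∀ init : Int, l.foldl (· + ·) init = init + l.sum := by
  induction l with
  | nil => simp
  | cons x rest ih => intro init; simp [ih]; omega

lemma map_snd_pairs (a : List Int) :
    ((a.map (fun x => (x, (0 : Int)))).map Prod.snd) = List.replicate a.length 0 := by
  induction a with
  | nil => simp
  | cons x rest ih => simp [ih, List.replicate_succ]

lemma pvF_eq_pvFA (a : List Int) (k : Int) (hk : 0 ≤ k) :
    pvF (a.map (fun x => if x > 0 then x else 0)) k = pvFA a k := by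
  have h : ∀ l : List Int, ∀ init : Int,
      (l.map (fun x => if x > 0 then x else 0)).foldl
        (fun s x => s + (if x < k then x else k)) init
        = init + pvFA l k := by
    intro l
    induction l with
    | nil => simp [pvFA]
    | cons x rest ih =>
      intro init
      simp only [List.map_cons, List.foldl_cons, ih]
      have hgx : (if (if x > 0 then x else 0) < k then (if x > 0 then x else 0) else k)
          = pvG x k := by simp only [pvG]; split_ifs <;> omega
      simp only [hgx, pvFA, List.map_cons, List.sum_cons]
      omega
  simpa [pvF] using h a 0

lemma pvFA_mono (a : List Int) (j k : Int) (hj : 0 ≤ j) (h : j ≤ k) :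
    pvFA a j ≤ pvFA a k := by
  induction a with
  | nil => simp [pvFA]
  | cons x rest ih =>
    simp only [pvFA, List.map_cons, List.sum_cons] at ih ⊢
    have : pvG x j ≤ pvG x k := by simp only [pvG]; omega
    omega

lemma pvFA_zero (a : List Int) : pvFA a 0 = 0 := by
  induction a with
  | nil => simp [pvFA]
  | cons x rest ih =>
    simp only [pvFA, List.map_cons, List.sum_cons] at ih ⊢
    have : pvG x 0 = 0 := by simp only [pvG]; omega
    omega

lemma pvSt_zero (a : List Int) : pvSt 0 a 0 = a.map (fun x => (x, 0)) := by
  induction a with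
  | nil => simp [pvSt]
  | cons x rest ih =>
    have h : ¬ (x > 0 ∧ (0 : Int) > 0) := by omega
    have hg : pvG x 0 = 0 := by simp only [pvG]; omega
    simp [pvSt, hg, ih]

-- max(pos) bounds every element of the list it is folded over
lemma foldl_max_bound (l : List Int) : ∀ h : Int,
    h ≤ l.foldl max h ∧ ∀ y ∈ l, y ≤ l.foldl max h := by
  induction l with
  | nil => simp
  | cons x rest ih =>
    intro h
    have h1 := ih (max h x)
    constructor
    · calc h ≤ max h x := le_max_left _ _
        _ ≤ _ := h1.1
    · intro y hy
      rcases List.mem_cons.mp hy with rfl | hy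
      · calc y ≤ max h y := le_max_right _ _
          _ ≤ _ := h1.1
      · exact h1.2 y hy

-- f at or above the maximum equals at least the total supply S
lemma pvFA_ge_sum (a : List Int) (M : Int) (hM : ∀ x ∈ a, x ≤ M) :
    a.sum ≤ pvFA a M := by
  induction a with
  | nil => simp [pvFA]
  | cons x rest ih =>
    simp only [pvFA, List.map_cons, List.sum_cons] at *
    have h1 : x ≤ M := hM x (List.mem_cons_self)
    have h2 := ih (fun y hy => hM y (List.mem_cons_of_mem _ hy))
    have : x ≤ pvG x M := by simp only [pvG]; omega
    omega

-- if no element exceeds level j, f is flat above j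
lemma pvFA_plateau (a : List Int) (j : Int) (hj : 0 ≤ j) (h : pvCnt a j = 0)
    (M : Int) (hM : j ≤ M) : pvFA a M = pvFA a j := by
  induction a with
  | nil => simp [pvFA]
  | cons x rest ih =>
    rw [pvCnt_cons] at h
    have hc := pvCnt_nonneg rest j
    have hx : ¬ (j < x) := by
      by_contra hx; simp [hx] at h; omega
    have h2 : pvCnt rest j = 0 := by simp [hx] at h; omega
    simp only [pvFA, List.map_cons, List.sum_cons] at *
    have : pvG x M = pvG x j := by simp only [pvG]; omega
    rw [this, ih h2]

-- the loop runs at least one serve per entered round, so level n needs f(n) ≥ n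
lemma pvFA_level_lower (a : List Int) (G M : Int) (hGM : G ≤ pvFA a M) :
    ∀ n : Nat, (n : Int) ≤ M → (∀ i : Int, 0 ≤ i → i < (n : Int) → pvFA a i < G) →
    (n : Int) ≤ pvFA a (n : Int) := by
  intro n
  induction n with
  | zero =>
    intro _ _
    simp only [Nat.cast_zero]
    rw [pvFA_zero]
  | succ k ih =>
    intro hM hbel
    have hk := ih (by push_cast at hM; omega)
      (fun i h1 h2 => hbel i h1 (by push_cast at h2; omega))
    have hfk : pvFA a (k : Int) < G := hbel _ (by positivity) (by push_cast; omega)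
    have hcnt : 1 ≤ pvCnt a (k : Int) := by
      by_contra hc
      have hc0 := pvCnt_nonneg a (k : Int)
      have hc1 : pvCnt a (k : Int) = 0 := by omega
      have := pvFA_plateau a (k : Int) (by positivity) hc1 M
        (by push_cast at hM ⊢; omega)
      omega
    have := pvFA_succ a (k : Int) (by positivity)
    push_cast
    omega

-- binary-search correctness: returns the least level p with f(p) ≥ G
lemma pvSearchB_spec (pos : List Int) (G : Int) :
    ∀ (fuel : Nat) (lo hi : Int), 0 ≤ lo → lo ≤ hi →
    (lo = 0 ∨ pvF pos (lo - 1) < G) → G ≤ pvF pos hi →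
    (hi - lo).toNat < fuel →
    0 ≤ pvSearchB pos G fuel lo hi ∧ pvSearchB pos G fuel lo hi ≤ hi ∧
    (pvSearchB pos G fuel lo hi = 0 ∨ pvF pos (pvSearchB pos G fuel lo hi - 1) < G) ∧
    G ≤ pvF pos (pvSearchB pos G fuel lo hi) := by
  intro fuel
  induction fuel with
  | zero => intro lo hi _ _ _ _ hf; omega
  | succ n ihn =>
    intro lo hi hlo hlh hprev hhi hf
    by_cases hlt : lo < hi
    · have hmid := PySem.Int.floordiv_two_mid_bounds (le_of_lt hlt)
      have hmidlt : PySem.Int.floordiv (lo + hi) 2 < hi := by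
        rw [PySem.Int.floordiv_lt_iff_lt_mul (by omega)]; omega
      set mid := PySem.Int.floordiv (lo + hi) 2 with hm
      by_cases hge : pvF pos mid ≥ G
      · have hr := ihn lo mid hlo (by omega) hprev hge (by omega)
        simp only [pvSearchB, if_pos hlt, ← hm, if_pos hge]
        exact ⟨hr.1, by omega, hr.2.2⟩
      · push_neg at hge
        have hprev' : mid + 1 = 0 ∨ pvF pos (mid + 1 - 1) < G := by
          right
          have h1 : mid + 1 - 1 = mid := by omega
          rw [h1]; omega
        have hr := ihn (mid + 1) hi (by omega) (by omega) hprev' hhi (by omega)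
        simp only [pvSearchB, if_pos hlt, ← hm, if_neg (show ¬ pvF pos mid ≥ G by omega)]
        exact hr
    · have hle : lo = hi := by omega
      simp only [pvSearchB, if_neg hlt]
      exact ⟨hlo, le_of_eq hle, hprev, hle ▸ hhi⟩

lemma pvOuterA_succ (r : Int) (fuel : Nat) (st : List (Int × Int)) (sumd allav : Int) :
    pvOuterA r (fuel + 1) st sumd allav =
      if r > sumd ∧ allav > 0 then
        pvOuterA r fuel (pvInnerA r st sumd allav).1
          (pvInnerA r st sumd allav).2.1 (pvInnerA r st sumd allav).2.2
      else st.map Prod.snd := rfl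

-- ===== VERDICT (by name: the statement is the Claim_ definition above) =====
theorem get_gpu_distribution_spec : Claim_equal_get_gpu_distribution := by
  intro runs available _ hpre
  unfold Spec_get_gpu_distribution
  match available, hpre with
  | h :: t, _ =>
    simp only [get_gpu_distribution, get_gpu_distribution_alt]
    set a : List Int := h :: t with ha
    have hSa : t.foldl (· + ·) h = a.sum := by
      rw [foldl_add_eq_sum]; simp [ha]
    have hSb : a.foldl (· + ·) 0 = a.sum := by
      rw [foldl_add_eq_sum]; omega
    simp only [hSa, hSb]
    by_cases hz : runs ≤ 0 ∨ a.sum ≤ 0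
    · -- degenerate: no run is distributed on either side
      rw [if_pos hz, pvOuterA_succ,
        if_neg (by rcases hz with h1 | h1 <;> omega), map_snd_pairs]
    · push_neg at hz
      obtain ⟨hr, hS⟩ := hz
      rw [if_neg (by omega)]
      -- names for B's intermediate values
      set pos : List Int := a.map (fun x => if x > 0 then x else 0) with hpos
      set G : Int := if runs < a.sum then runs else a.sum with hG
      have hGmin : G = min runs a.sum := by rw [hG]; split_ifs <;> omega
      set f0 : Int := if h > 0 then h else 0 with hf0
      have hposa : pos = f0 :: t.map (fun x => if x > 0 then x else 0) := by
        simp [hpos, ha, hf0]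
      set M : Int := (t.map (fun x => if x > 0 then x else 0)).foldl max f0 with hM
      have hmax := foldl_max_bound (t.map (fun x => if x > 0 then x else 0)) f0
      have hM0 : 0 ≤ M := le_trans (by rw [hf0]; split_ifs <;> omega) hmax.1
      have hbound : ∀ x ∈ a, x ≤ M := by
        intro x hx
        rw [ha] at hx
        rcases List.mem_cons.mp hx with rfl | hx
        · exact le_trans (by rw [hf0]; split_ifs <;> omega) hmax.1
        · have hxm : (if x > 0 then x else 0) ≤ M :=
            hmax.2 _ (List.mem_map_of_mem hx)
          split_ifs at hxm <;> omega
      have hFM : G ≤ pvF pos M := by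
        rw [hpos, pvF_eq_pvFA a M hM0]
        have := pvFA_ge_sum a M hbound
        rw [hGmin]; omega
      -- reduce B's `max(pos)` match and fold it back to M
      simp only [hposa]
      rw [← hM, ← hposa]
      set p : Int := pvSearchB pos G (M.toNat + 1) 0 M with hp
      have hsrch := pvSearchB_spec pos G (M.toNat + 1) 0 M
        (by omega) hM0 (Or.inl rfl) hFM (by omega)
      rw [← hp] at hsrch
      obtain ⟨hp0, hpM, hpprev, hpG⟩ := hsrch
      have hGpos : 0 < G := by rw [hGmin]; omega
      have hF0 : pvF pos 0 = 0 := by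
        rw [hpos, pvF_eq_pvFA a 0 le_rfl, pvFA_zero]
      have hp1 : 1 ≤ p := by
        by_contra hc
        have hpz : p = 0 := by omega
        rw [hpz, hF0] at hpG
        omega
      have hpprev' : pvF pos (p - 1) < G := by
        rcases hpprev with h0 | h0
        · omega
        · exact h0
      have hFAprev : pvFA a (p - 1) < G := by
        rw [hpos, pvF_eq_pvFA a (p - 1) (by omega)] at hpprev'
        exact hpprev'
      have hFAp : G ≤ pvFA a p := by
        rw [hpos, pvF_eq_pvFA a p (by omega)] at hpG
        exact hpG
      -- p ≤ S, so A's fuel S.toNat + 1 covers all rounds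
      have hpS : p ≤ a.sum := by
        have hGM : G ≤ pvFA a M := by
          rw [hpos, pvF_eq_pvFA a M hM0] at hFM; exact hFM
        have hlow := pvFA_level_lower a G M hGM (p - 1).toNat
          (by omega)
          (fun i h1 h2 => by
            have : pvFA a i ≤ pvFA a (p - 1) := pvFA_mono a i (p - 1) h1 (by omega)
            omega)
        have he : (((p - 1).toNat : Nat) : Int) = p - 1 := by omega
        rw [he] at hlow
        rw [hGmin] at hFAprev
        omega
      -- run A's outer loop through the levels
      have houter := pvOuterA_levels runs a.sum a (a.sum.toNat + 1) 0 p
        le_rfl (by omega)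
        (fun j hj hj2 => by
          have h1 : pvFA a j ≤ pvFA a (p - 1) := pvFA_mono a j (p - 1) hj (by omega)
          rw [hGmin] at hFAprev
          omega)
        (by rw [hGmin] at hFAp; omega)
        (by omega)
      rw [pvSt_zero, pvFA_zero] at houter
      simp only [sub_zero] at houter
      rw [houter, if_pos (by omega : (0 : Int) < p)]
      -- B's emitted output is the same
      rw [hpos, pvF_eq_pvFA a p (by omega), pvF_eq_pvFA a (p - 1) (by omega)]
      have hT : (if runs < pvFA a p then runs else pvFA a p) = min runs (pvFA a p) := by
        split_ifs <;> omega
      rw [hT]
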